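-- pv_equiv track=rewrite | github.com/Centaurus-X/fluux_control_runtime | product/src/adapters/compiler/_projection_bridge.py | _sorted_unique_texts
-- ===== SOURCE A (Python) =====
-- def _string_or_none(value):
--     if value is None:
--         return None
--     text = str(value).strip()
--     if not text:
--         return None
--     return text
--
-- def _sorted_unique_texts(values):
--     result = []
--     seen = set()
--
--     for value in values:
--         text = _string_or_none(value)
--         if not text:
--             continue
--         if text in seen:
--             continue
--         seen.add(text)
--         result.append(text)
--
--     result.sort()
--     return result
-- ===== SOURCE B (Python) =====
-- def _string_or_none(value):
--     if value is None:
--         return None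
--     text = str(value).strip()
--     if not text:
--         return None
--     return text
--
-- def _sorted_unique_texts(values):
--     texts = []
--     for value in values:
--         text = _string_or_none(value)
--         if text:
--             texts.append(text)
--     texts.sort()
--     result = []
--     for text in texts:
--         if not result or result[-1] != text:
--             result.append(text)
--     return result
-- ===== Notes on version B (the rewrite author's own statement) =====
-- stated objective: alternative
-- what changed: B drops A's 'seen' hash set entirely: it collects the cleaned texts, sorts them, and removes duplicates in one adjacency pass over the sorted list (append only when different from the last appended element), so uniqueness comes from sorted order rather than set membership.
import Mathlib
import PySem

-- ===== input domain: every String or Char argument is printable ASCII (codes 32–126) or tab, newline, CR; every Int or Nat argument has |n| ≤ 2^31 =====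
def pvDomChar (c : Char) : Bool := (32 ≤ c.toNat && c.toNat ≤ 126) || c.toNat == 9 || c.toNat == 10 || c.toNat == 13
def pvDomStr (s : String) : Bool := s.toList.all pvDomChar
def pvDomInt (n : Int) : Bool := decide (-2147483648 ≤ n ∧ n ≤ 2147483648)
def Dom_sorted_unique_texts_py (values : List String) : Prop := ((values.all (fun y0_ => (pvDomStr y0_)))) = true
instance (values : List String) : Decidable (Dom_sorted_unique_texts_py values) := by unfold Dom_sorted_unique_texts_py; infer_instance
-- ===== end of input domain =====

-- B removes A's 'seen' set: it sorts the cleaned texts first and deduplicates by a single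
-- adjacency pass (append only when different from the last appended element).


-- ===== PORT A =====
-- _string_or_none: values are Strings here (never None), str(value) is the identity on str.
def stringOrNone (value : String) : Option String :=
  let text := PySem.Str.strip value
  if text = "" then none else some text

def sorted_unique_texts_py (values : List String) : List String :=
  let st := values.foldl
    (fun (st : List String × PySem.Set String) value =>
      match stringOrNone value with
      | none => st
      | some text =>
        if PySem.Set.contains st.2 text then st
        else (st.1 ++ [text], PySem.Set.add st.2 text))
    ([], PySem.Set.empty)
  PySem.List.sorted st.1 (fun x => x) false

-- ===== PORT B =====
def sorted_unique_texts_py_alt (values : List String) : List String :=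
  let texts := values.foldl
    (fun acc value =>
      match stringOrNone value with
      | none => acc
      | some text => acc ++ [text]) []
  let texts := PySem.List.sorted texts (fun x => x) false
  texts.foldl
    (fun result text =>
      if result.isEmpty || (result.getLast? != some text) then result ++ [text] else result) []

-- ===== PRECONDITION & SPEC =====
def Spec_sorted_unique_texts_py (values : List String) (out : List String) : Prop := out = sorted_unique_texts_py_alt values
instance (values : List String) (out : List String) : Decidable (Spec_sorted_unique_texts_py values out) := by unfold Spec_sorted_unique_texts_py; infer_instance

-- ===== CLAIM (what is proved, stated in full; the proofs are below) =====
def Claim_equal_sorted_unique_texts_py : Prop := ∀ (values : List String), Dom_sorted_unique_texts_py values → Spec_sorted_unique_texts_py values (sorted_unique_texts_py values)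

-- ===== LEMMAS AND PROOFS =====

-- A's loop keeps result and seen equal (as lists) when they start equal:
-- each step maps (s, s) to (Set.add s text, Set.add s text).
lemma aloop_pair_eq (values : List String) (s : PySem.Set String) :
    values.foldl
      (fun (st : List String × PySem.Set String) value =>
        match stringOrNone value with
        | none => st
        | some text =>
          if PySem.Set.contains st.2 text then st
          else (st.1 ++ [text], PySem.Set.add st.2 text))
      (s, s)
    = (values.foldl
        (fun (t : PySem.Set String) value =>
          match stringOrNone value with
          | none => t
          | some text => PySem.Set.add t text) s,
       values.foldl
        (fun (t : PySem.Set String) value =>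
          match stringOrNone value with
          | none => t
          | some text => PySem.Set.add t text) s) := by
  induction values generalizing s with
  | nil => rfl
  | cons v vs ih =>
    simp only [List.foldl_cons]
    cases h : stringOrNone v with
    | none => exact ih s
    | some t =>
      have hstep : (if PySem.Set.contains s t = true then ((s, s) : List String × PySem.Set String)
            else (s ++ [t], PySem.Set.add s t))
          = (PySem.Set.add s t, PySem.Set.add s t) := by
        by_cases hc : t ∈ s <;> simp [PySem.Set.add, PySem.Set.contains, hc]
      dsimp only
      rw [hstep]
      exact ih _

-- the seen-set fold over values is the Set.add fold over the cleaned texts.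
lemma seen_fold_eq (values : List String) (s : PySem.Set String) :
    values.foldl
      (fun (t : PySem.Set String) value =>
        match stringOrNone value with
        | none => t
        | some text => PySem.Set.add t text) s
    = (values.filterMap stringOrNone).foldl PySem.Set.add s := by
  induction values generalizing s with
  | nil => rfl
  | cons v vs ih =>
    simp only [List.foldl_cons, List.filterMap_cons]
    cases h : stringOrNone v <;> simp [ih]

-- B's first loop collects the cleaned texts.
lemma bloop_collect (values : List String) (acc : List String) :
    values.foldl
      (fun acc value =>
        match stringOrNone value with
        | none => acc
        | some text => acc ++ [text]) acc
    = acc ++ values.filterMap stringOrNone := by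
  induction values generalizing acc with
  | nil => simp
  | cons v vs ih =>
    simp only [List.foldl_cons, List.filterMap_cons]
    cases h : stringOrNone v <;> simp [ih]

-- in a strictly increasing list every element is ≤ the last.
lemma le_getLast_of_pairwise_lt {l : List String} {x : String}
    (hp : l.Pairwise (· < ·)) (hl : l.getLast? = some x) : ∀ a ∈ l, a ≤ x := by
  induction l with
  | nil => simp at hl
  | cons b t ih =>
    cases t with
    | nil => simp_all
    | cons c u =>
      intro a ha
      have hlast : (c :: u).getLast? = some x := by simpa using hl
      rcases List.mem_cons.mp ha with rfl | ha
      · exact le_of_lt (List.rel_of_pairwise_cons hp (List.mem_of_getLast? hlast))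
      · exact ih hp.of_cons hlast a ha

-- invariant of B's adjacency-dedup fold over a sorted (Pairwise ≤) list.
lemma adj_inv (xs : List String) (acc : List String)
    (hxs : xs.Pairwise (· ≤ ·)) (hacc : acc.Pairwise (· < ·))
    (hle : ∀ l, acc.getLast? = some l → ∀ x ∈ xs, l ≤ x) :
    (xs.foldl
      (fun result text =>
        if result.isEmpty || (result.getLast? != some text) then result ++ [text] else result)
      acc).Pairwise (· < ·)
    ∧ ∀ y, y ∈ xs.foldl
      (fun result text =>
        if result.isEmpty || (result.getLast? != some text) then result ++ [text] else result)
      acc ↔ y ∈ acc ∨ y ∈ xs := by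
  induction xs generalizing acc with
  | nil =>
    refine ⟨hacc, ?_⟩
    simp
  | cons t rest ih =>
    simp only [List.foldl_cons]
    by_cases hE : acc = []
    · subst hE
      simp only [List.isEmpty_nil, Bool.true_or, if_pos, List.nil_append]
      have h := ih [t] hxs.of_cons (by simp)
        (by
          intro l hlast x hx
          simp at hlast
          subst hlast
          exact List.rel_of_pairwise_cons hxs hx)
      refine ⟨h.1, fun y => ?_⟩
      rw [h.2 y]
      simp
    · obtain ⟨l, hl⟩ : ∃ l, acc.getLast? = some l := by
        cases hg : acc.getLast? with
        | none => exact absurd (List.getLast?_eq_none_iff.mp hg) hE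
        | some l => exact ⟨l, rfl⟩
      have hlt : l ≤ t := hle l hl t (by simp)
      by_cases heq : l = t
      · -- skip: the last element of result equals t
        have hskip : (if acc.isEmpty || (acc.getLast? != some t) then acc ++ [t] else acc)
            = acc := by
          subst heq
          simp [List.isEmpty_iff, hE, hl]
        rw [hskip]
        have h := ih acc hxs.of_cons hacc
          (by
            intro l' hl' x hx
            rw [hl] at hl'; injection hl' with hll; subst hll
            exact hle l hl x (by simp [hx]))
        refine ⟨h.1, fun y => ?_⟩
        rw [h.2 y]
        constructor
        · rintro (hy | hy)
          · exact Or.inl hy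
          · exact Or.inr (List.mem_cons_of_mem _ hy)
        · rintro (hy | hy)
          · exact Or.inl hy
          · rcases List.mem_cons.mp hy with rfl | hy
            · exact Or.inl (by rw [← heq]; exact List.mem_of_getLast? hl)
            · exact Or.inr hy
      · -- append: the last element of result differs from t
        have hne : (acc.getLast? != some t) = true := by simp [hl, heq]
        have hstep : (if acc.isEmpty || (acc.getLast? != some t) then acc ++ [t] else acc)
            = acc ++ [t] := by simp [hne]
        rw [hstep]
        have hpair : (acc ++ [t]).Pairwise (· < ·) := by
          rw [List.pairwise_append]
          refine ⟨hacc, by simp, ?_⟩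
          intro a ha b hb
          simp only [List.mem_singleton] at hb; subst hb
          exact lt_of_le_of_lt (le_getLast_of_pairwise_lt hacc hl a ha)
            (lt_of_le_of_ne hlt heq)
        have h := ih (acc ++ [t]) hxs.of_cons hpair
          (by
            intro l' hl' x hx
            simp at hl'; subst hl'
            exact List.rel_of_pairwise_cons hxs hx)
        refine ⟨h.1, fun y => ?_⟩
        rw [h.2 y]
        simp only [List.mem_append, List.mem_cons]
        tauto

-- ===== VERDICT (by name: the statement is the Claim_ definition above) =====
theorem sorted_unique_texts_py_spec : Claim_equal_sorted_unique_texts_py := by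
  intro values _
  unfold Spec_sorted_unique_texts_py sorted_unique_texts_py sorted_unique_texts_py_alt
  simp only []
  rw [show (PySem.Set.empty : PySem.Set String) = ([] : List String) from rfl]
  rw [aloop_pair_eq, seen_fold_eq, bloop_collect]
  rw [← PySem.Set.ofList_eq_foldl]
  simp only [List.nil_append]
  set cl := values.filterMap stringOrNone with hcl
  have hadj := adj_inv (PySem.List.sorted cl (fun x => x) false) []
    (by simpa using PySem.List.sorted_pairwise cl (fun x => x)) (by simp) (by simp)
  refine PySem.List.sorted_eq_of_perm_of_pairwise_lt _ _ _ ?_ hadj.1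
  refine (List.perm_ext_iff_of_nodup (hadj.1.imp fun h => ne_of_lt h) (PySem.Set.nodup_ofList cl)).mpr ?_
  intro a
  rw [hadj.2 a, PySem.Set.mem_ofList]
  simp [PySem.List.mem_sorted]
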